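-- pv_equiv track=rewrite | github.com/phord/Advent-of-Code-2021 | 22.py | cleave
-- ===== SOURCE A (Python) =====
-- def cleave_x(cube, cx):
--     x0,x1,y0,y1,z0,z1 = cube
--     cubes = set()
--     if x1 < cx or x0 > cx:
--         return set([cube])
--
--     cubes.add((x0,cx-1,y0,y1,z0,z1))
--     cubes.add((cx,x1,y0,y1,z0,z1))
--     return cubes
--
-- def cleave_y(cube, cy):
--     x0,x1,y0,y1,z0,z1 = cube
--     cubes = set()
--     if y1 < cy or y0 > cy:
--         return set([cube])
--
--     cubes.add((x0,x1,y0,cy-1,z0,z1))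
--     cubes.add((x0,x1,cy,y1,z0,z1))
--     return cubes
--
-- def cleave_z(cube, cz):
--     x0,x1,y0,y1,z0,z1 = cube
--     cubes = set()
--     if z1 < cz or z0 > cz:
--         return set([cube])
--
--     cubes.add((x0,x1,y0,y1,z0,cz-1))
--     cubes.add((x0,x1,y0,y1,cz,z1))
--     return cubes
--
-- def cleave(cube, x, y, z):
--     cubes = cleave_x(cube, x)
--     c2 = set()
--     for c in cubes:
--         c2 |= cleave_y(c, y)
--     c3 = set()
--     for c in c2:
--         c3 |= cleave_z(c, z)
--     return c3
-- ===== SOURCE B (Python) =====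
-- def cleave(cube, x, y, z):
--     x0, x1, y0, y1, z0, z1 = cube
--     xs = [(x0, x1)] if x1 < x or x0 > x else [(x0, x - 1), (x, x1)]
--     ys = [(y0, y1)] if y1 < y or y0 > y else [(y0, y - 1), (y, y1)]
--     zs = [(z0, z1)] if z1 < z or z0 > z else [(z0, z - 1), (z, z1)]
--     return {(a0, a1, b0, b1, c0, c1)
--             for a0, a1 in xs for b0, b1 in ys for c0, c1 in zs}
-- ===== Notes on version B (the rewrite author's own statement) =====
-- stated objective: alternative
-- what changed: B computes one independent interval list per axis and returns the Cartesian product of the three lists as a set comprehension, replacing A's three chained split-every-cube-in-a-set passes with set unions.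
import Mathlib
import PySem

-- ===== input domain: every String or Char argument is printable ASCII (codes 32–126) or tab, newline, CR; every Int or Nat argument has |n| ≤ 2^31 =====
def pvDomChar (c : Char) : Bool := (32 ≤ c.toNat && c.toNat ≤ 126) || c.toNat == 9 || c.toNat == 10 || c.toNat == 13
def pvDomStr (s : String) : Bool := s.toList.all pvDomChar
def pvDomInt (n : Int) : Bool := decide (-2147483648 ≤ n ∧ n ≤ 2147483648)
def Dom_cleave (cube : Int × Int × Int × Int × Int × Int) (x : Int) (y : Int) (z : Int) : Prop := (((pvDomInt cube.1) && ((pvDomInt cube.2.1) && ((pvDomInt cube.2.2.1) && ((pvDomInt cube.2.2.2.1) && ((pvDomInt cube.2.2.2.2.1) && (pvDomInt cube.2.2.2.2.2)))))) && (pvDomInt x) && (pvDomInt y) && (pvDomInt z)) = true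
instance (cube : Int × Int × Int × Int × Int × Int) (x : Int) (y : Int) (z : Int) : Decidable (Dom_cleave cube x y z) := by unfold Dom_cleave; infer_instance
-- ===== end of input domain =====

-- B replaces A's three chained split-every-cube-in-a-set passes by three independent
-- per-axis interval lists combined in one Cartesian product (objective: alternative decomposition).

-- ===== PORT A =====
def cleaveXA (cube : Int × Int × Int × Int × Int × Int) (cx : Int) : List (Int × Int × Int × Int × Int × Int) :=
  let (x0, x1, y0, y1, z0, z1) := cube
  if x1 < cx ∨ x0 > cx then PySem.Set.ofList [cube]
  else PySem.Set.add (PySem.Set.add PySem.Set.empty (x0, cx - 1, y0, y1, z0, z1)) (cx, x1, y0, y1, z0, z1)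

def cleaveYA (cube : Int × Int × Int × Int × Int × Int) (cy : Int) : List (Int × Int × Int × Int × Int × Int) :=
  let (x0, x1, y0, y1, z0, z1) := cube
  if y1 < cy ∨ y0 > cy then PySem.Set.ofList [cube]
  else PySem.Set.add (PySem.Set.add PySem.Set.empty (x0, x1, y0, cy - 1, z0, z1)) (x0, x1, cy, y1, z0, z1)

def cleaveZA (cube : Int × Int × Int × Int × Int × Int) (cz : Int) : List (Int × Int × Int × Int × Int × Int) :=
  let (x0, x1, y0, y1, z0, z1) := cube
  if z1 < cz ∨ z0 > cz then PySem.Set.ofList [cube]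
  else PySem.Set.add (PySem.Set.add PySem.Set.empty (x0, x1, y0, y1, z0, cz - 1)) (x0, x1, y0, y1, cz, z1)

def cleave (cube : Int × Int × Int × Int × Int × Int) (x : Int) (y : Int) (z : Int) : List (Int × Int × Int × Int × Int × Int) :=
  let cubes := cleaveXA cube x
  let c2 := cubes.foldl (fun s c => PySem.Set.union s (cleaveYA c y)) PySem.Set.empty
  let c3 := c2.foldl (fun s c => PySem.Set.union s (cleaveZA c z)) PySem.Set.empty
  c3

-- ===== PORT B =====
def axisSplit (lo : Int) (hi : Int) (c : Int) : List (Int × Int) :=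
  if hi < c ∨ lo > c then [(lo, hi)] else [(lo, c - 1), (c, hi)]

def cleave_alt (cube : Int × Int × Int × Int × Int × Int) (x : Int) (y : Int) (z : Int) : List (Int × Int × Int × Int × Int × Int) :=
  let (x0, x1, y0, y1, z0, z1) := cube
  PySem.Set.ofList
    ((axisSplit x0 x1 x).flatMap fun a =>
      (axisSplit y0 y1 y).flatMap fun b =>
        (axisSplit z0 z1 z).map fun c => (a.1, a.2, b.1, b.2, c.1, c.2))

-- ===== PRECONDITION & SPEC =====
def Spec_cleave (cube : Int × Int × Int × Int × Int × Int) (x : Int) (y : Int) (z : Int) (out : List (Int × Int × Int × Int × Int × Int)) : Prop := out = cleave_alt cube x y z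
instance (cube : Int × Int × Int × Int × Int × Int) (x : Int) (y : Int) (z : Int) (out : List (Int × Int × Int × Int × Int × Int)) : Decidable (Spec_cleave cube x y z out) := by unfold Spec_cleave; infer_instance

-- ===== CLAIM (what is proved, stated in full; the proofs are below) =====
def Claim_equal_cleave : Prop := ∀ (cube : Int × Int × Int × Int × Int × Int) (x : Int) (y : Int) (z : Int), Dom_cleave cube x y z → Spec_cleave cube x y z (cleave cube x y z)

-- ===== LEMMAS AND PROOFS =====

theorem axisSplit_nodup (lo hi c : Int) : (axisSplit lo hi c).Nodup := by
  unfold axisSplit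
  split_ifs with h
  · simp
  · simp only [List.nodup_cons, List.mem_singleton, List.not_mem_nil, not_false_iff,
      List.nodup_nil, and_true]
    intro hEq
    rw [Prod.ext_iff] at hEq
    push Not at h
    omega

theorem cleaveXA_eq (x0 x1 y0 y1 z0 z1 cx : Int) :
    cleaveXA (x0, x1, y0, y1, z0, z1) cx
      = (axisSplit x0 x1 cx).map (fun a => (a.1, a.2, y0, y1, z0, z1)) := by
  unfold cleaveXA axisSplit
  dsimp only
  split_ifs with h
  · rfl
  · rw [show (PySem.Set.add PySem.Set.empty (x0, cx - 1, y0, y1, z0, z1))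
        = [(x0, cx - 1, y0, y1, z0, z1)] from rfl,
      PySem.Set.add_of_not_mem]
    · rfl
    · simp only [List.mem_singleton, Prod.mk.injEq, not_and]
      intro h1
      push Not at h
      omega

theorem cleaveYA_eq (x0 x1 y0 y1 z0 z1 cy : Int) :
    cleaveYA (x0, x1, y0, y1, z0, z1) cy
      = (axisSplit y0 y1 cy).map (fun b => (x0, x1, b.1, b.2, z0, z1)) := by
  unfold cleaveYA axisSplit
  dsimp only
  split_ifs with h
  · rfl
  · rw [show (PySem.Set.add PySem.Set.empty (x0, x1, y0, cy - 1, z0, z1))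
        = [(x0, x1, y0, cy - 1, z0, z1)] from rfl,
      PySem.Set.add_of_not_mem]
    · rfl
    · simp only [List.mem_singleton, Prod.mk.injEq, not_and]
      intro _ _ h1
      push Not at h
      omega

theorem cleaveZA_eq (x0 x1 y0 y1 z0 z1 cz : Int) :
    cleaveZA (x0, x1, y0, y1, z0, z1) cz
      = (axisSplit z0 z1 cz).map (fun c => (x0, x1, y0, y1, c.1, c.2)) := by
  unfold cleaveZA axisSplit
  dsimp only
  split_ifs with h
  · rfl
  · rw [show (PySem.Set.add PySem.Set.empty (x0, x1, y0, y1, z0, cz - 1))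
        = [(x0, x1, y0, y1, z0, cz - 1)] from rfl,
      PySem.Set.add_of_not_mem]
    · rfl
    · simp only [List.mem_singleton, Prod.mk.injEq, not_and]
      intro _ _ _ _ h1
      push Not at h
      omega

-- union with a fresh, duplicate-free second argument is concatenation
theorem union_of_disjoint {α : Type} [BEq α] [LawfulBEq α] (s t : List α)
    (ht : t.Nodup) (hd : ∀ x ∈ t, x ∉ s) : PySem.Set.union s t = s ++ t := by
  induction t generalizing s with
  | nil => simp [PySem.Set.union, PySem.Set.update]
  | cons a t ih =>
    have ha : a ∉ s := hd a (List.mem_cons_self)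
    have step : PySem.Set.union s (a :: t) = PySem.Set.union (s ++ [a]) t := by
      simp [PySem.Set.union, PySem.Set.update, PySem.Set.add_of_not_mem ha]
    rw [step, ih (s ++ [a])]
    · simp
    · exact ht.of_cons
    · intro x hx
      simp only [List.mem_append, List.mem_singleton]
      rintro (h1 | rfl)
      · exact hd x (List.mem_cons_of_mem _ hx) h1
      · exact (List.nodup_cons.mp ht).1 hx

-- folding '∪' of pieces over an empty set is flattening, when everything is distinct
theorem foldl_union_eq_flatMap {α β : Type} [BEq β] [LawfulBEq β]
    (l : List α) (f : α → List β) :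
    ∀ s : List β, (s ++ l.flatMap f).Nodup →
      l.foldl (fun s c => PySem.Set.union s (f c)) s = s ++ l.flatMap f := by
  induction l with
  | nil => intro s _; simp
  | cons a l ih =>
    intro s h
    simp only [List.flatMap_cons, ← List.append_assoc] at h
    have h1 : (s ++ f a).Nodup := h.of_append_left
    obtain ⟨hs, hfa, hdisj⟩ := List.nodup_append.mp h1
    have hu : PySem.Set.union s (f a) = s ++ f a :=
      union_of_disjoint s (f a) hfa (fun x hx hxs => hdisj x hxs x hx rfl)
    simp only [List.foldl_cons, hu, List.flatMap_cons, ← List.append_assoc]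
    exact ih (s ++ f a) h

theorem flatMap_map_eq_product_map {α β γ : Type} (l1 : List α) (l2 : List β) (f : α → β → γ) :
    (l1.flatMap fun a => l2.map (f a)) = (l1 ×ˢ l2).map (fun p => f p.1 p.2) := by
  simp only [List.product, SProd.sprod, List.map_flatMap, List.map_map]
  rfl

theorem nodup_flatMap_map {α β γ : Type} (l1 : List α) (l2 : List β) (f : α → β → γ)
    (hinj : ∀ a a' b b', f a b = f a' b' → a = a' ∧ b = b')
    (h1 : l1.Nodup) (h2 : l2.Nodup) : (l1.flatMap fun a => l2.map (f a)).Nodup := by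
  rw [flatMap_map_eq_product_map]
  refine (h1.product h2).map ?_
  rintro ⟨a, b⟩ ⟨a', b'⟩ h
  obtain ⟨ha, hb⟩ := hinj a a' b b' h
  simp [ha, hb]

-- ===== VERDICT (by name: the statement is the Claim_ definition above) =====
theorem cleave_spec : Claim_equal_cleave := by
  intro cube x y z _
  obtain ⟨x0, x1, y0, y1, z0, z1⟩ := cube
  unfold Spec_cleave cleave cleave_alt
  dsimp only
  have hnx := axisSplit_nodup x0 x1 x
  have hny := axisSplit_nodup y0 y1 y
  have hnz := axisSplit_nodup z0 z1 z
  -- the flattened product list, in the order both programs build it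
  have hL2 : ((axisSplit x0 x1 x).flatMap fun a =>
      (axisSplit y0 y1 y).map fun b => (a.1, a.2, b.1, b.2, z0, z1)).Nodup := by
    refine nodup_flatMap_map _ _ _ ?_ hnx hny
    intro a a' b b' h
    simp only [Prod.mk.injEq] at h
    exact ⟨Prod.ext h.1 h.2.1, Prod.ext h.2.2.1 h.2.2.2.1⟩
  have hL3 : ((axisSplit x0 x1 x).flatMap fun a =>
      (axisSplit y0 y1 y).flatMap fun b =>
        (axisSplit z0 z1 z).map fun c => (a.1, a.2, b.1, b.2, c.1, c.2)).Nodup := by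
    rw [List.flatMap_congr (fun a _ => flatMap_map_eq_product_map
      (axisSplit y0 y1 y) (axisSplit z0 z1 z) (fun b c => (a.1, a.2, b.1, b.2, c.1, c.2)))]
    refine nodup_flatMap_map (axisSplit x0 x1 x) ((axisSplit y0 y1 y) ×ˢ (axisSplit z0 z1 z))
      (fun a q => (a.1, a.2, q.1.1, q.1.2, q.2.1, q.2.2)) ?_ hnx (hny.product hnz)
    intro a a' b b' h
    simp only [Prod.mk.injEq] at h
    exact ⟨Prod.ext h.1 h.2.1,
      Prod.ext (Prod.ext h.2.2.1 h.2.2.2.1) (Prod.ext h.2.2.2.2.1 h.2.2.2.2.2)⟩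
  rw [PySem.Set.ofList_eq_self_of_nodup _ hL3]
  rw [cleaveXA_eq]
  have e2 : (((axisSplit x0 x1 x).map fun a => (a.1, a.2, y0, y1, z0, z1)).flatMap
      fun c => cleaveYA c y)
      = (axisSplit x0 x1 x).flatMap fun a =>
          (axisSplit y0 y1 y).map fun b => (a.1, a.2, b.1, b.2, z0, z1) := by
    simp [List.flatMap_map, cleaveYA_eq]
  have c2eq : List.foldl (fun s c => PySem.Set.union s (cleaveYA c y)) ([] : List (Int × Int × Int × Int × Int × Int))
      ((axisSplit x0 x1 x).map fun a => (a.1, a.2, y0, y1, z0, z1))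
      = (axisSplit x0 x1 x).flatMap fun a =>
          (axisSplit y0 y1 y).map fun b => (a.1, a.2, b.1, b.2, z0, z1) := by
    have f2 := foldl_union_eq_flatMap
      ((axisSplit x0 x1 x).map fun a => (a.1, a.2, y0, y1, z0, z1))
      (fun c => cleaveYA c y) [] (by simpa [e2] using hL2)
    simpa [e2] using f2
  rw [show (PySem.Set.empty : List (Int × Int × Int × Int × Int × Int)) = [] from rfl,
    c2eq]
  have e3 : (((axisSplit x0 x1 x).flatMap fun a =>
      (axisSplit y0 y1 y).map fun b => (a.1, a.2, b.1, b.2, z0, z1)).flatMap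
      fun c => cleaveZA c z)
      = (axisSplit x0 x1 x).flatMap fun a =>
          (axisSplit y0 y1 y).flatMap fun b =>
            (axisSplit z0 z1 z).map fun c => (a.1, a.2, b.1, b.2, c.1, c.2) := by
    simp [List.flatMap_assoc, List.flatMap_map, cleaveZA_eq]
  have c3eq : List.foldl (fun s c => PySem.Set.union s (cleaveZA c z)) ([] : List (Int × Int × Int × Int × Int × Int))
      ((axisSplit x0 x1 x).flatMap fun a =>
        (axisSplit y0 y1 y).map fun b => (a.1, a.2, b.1, b.2, z0, z1))
      = (axisSplit x0 x1 x).flatMap fun a =>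
          (axisSplit y0 y1 y).flatMap fun b =>
            (axisSplit z0 z1 z).map fun c => (a.1, a.2, b.1, b.2, c.1, c.2) := by
    have f3 := foldl_union_eq_flatMap
      ((axisSplit x0 x1 x).flatMap fun a =>
        (axisSplit y0 y1 y).map fun b => (a.1, a.2, b.1, b.2, z0, z1))
      (fun c => cleaveZA c z) [] (by simpa [e3] using hL3)
    simpa [e3] using f3
  rw [c3eq]
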